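-- pv_equiv track=rewrite | github.com/kh277/BOJ | 백준/Gold/19321. Longest Increasing Subsequence/Longest Increasing Subsequence.py | solve
-- ===== SOURCE A (Python) =====
-- def solve(N, A):
--     LIS = [[] for _ in range(N+1)]
--     for i in range(N):
--         LIS[A[i]].append(i)
--
--     result = [0 for _ in range(N)]
--     count = 1
--     for i in range(N+1):
--         for j in LIS[i][::-1]:
--             result[j] = count
--             count += 1
--
--     return result
-- ===== SOURCE B (Python) =====
-- def solve(N, A):
--     order = sorted(range(N), key=lambda i: (A[i], -i))
--     result = [0] * N
--     for p, i in enumerate(order):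
--         result[i] = p + 1
--     return result
-- ===== Notes on version B (the rewrite author's own statement) =====
-- stated objective: idiomatic
-- what changed: B replaces A's value-indexed bucket table (append indices to LIS[A[i]], then scan values ascending reading each bucket reversed) with one stable sort of the indices on the key (A[i], -i) followed by a single enumerate pass that writes the ranks; Pre_ restricts to the problem's natural domain (N <= len(A) and 0 <= A[i] <= N for i < N), excluding inputs where A raises IndexError and inputs with negative values, whose bucket placement in A comes from Python's negative-index wraparound.
-- outside the precondition, e.g. on solve(2, [-1, 0]): A returns [2, 1], B returns [1, 2]
import Mathlib
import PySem

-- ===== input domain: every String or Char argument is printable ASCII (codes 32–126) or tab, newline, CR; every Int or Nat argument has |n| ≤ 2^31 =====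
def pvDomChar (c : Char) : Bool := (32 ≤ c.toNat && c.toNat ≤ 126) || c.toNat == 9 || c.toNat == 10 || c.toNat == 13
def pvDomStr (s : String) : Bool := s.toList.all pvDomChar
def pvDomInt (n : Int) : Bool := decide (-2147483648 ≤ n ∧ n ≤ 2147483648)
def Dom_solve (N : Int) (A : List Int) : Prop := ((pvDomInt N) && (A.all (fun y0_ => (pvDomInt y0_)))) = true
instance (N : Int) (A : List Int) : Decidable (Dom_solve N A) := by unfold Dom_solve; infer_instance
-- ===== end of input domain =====

-- B assigns the same ranks by one stable index sort on the key (A[i], -i) instead of A's bucket table; same cost class, more idiomatic.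

-- ===== PORT A =====
def solve (N : Int) (A : List Int) : List Int :=
  -- LIS = [[] for _ in range(N+1)]
  let LIS0 : List (List Int) := (PySem.List.pyRange 0 (N + 1)).map (fun _ => ([] : List Int))
  -- for i in range(N): LIS[A[i]].append(i)
  let LIS : List (List Int) :=
    (PySem.List.pyRange 0 N).foldl
      (fun L i =>
        PySem.List.pySetD L (PySem.List.pyGetD A i 0)
          (PySem.List.pyGetD L (PySem.List.pyGetD A i 0) [] ++ [i]))
      LIS0
  -- result = [0 for _ in range(N)]; count = 1
  let result0 : List Int := (PySem.List.pyRange 0 N).map (fun _ => (0 : Int))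
  -- for i in range(N+1): for j in LIS[i][::-1]: result[j] = count; count += 1
  let final : List Int × Int :=
    (PySem.List.pyRange 0 (N + 1)).foldl
      (fun s i =>
        ((PySem.List.slice? (PySem.List.pyGetD LIS i []) none none (-1)).getD []).foldl
          (fun t j => (PySem.List.pySetD t.1 j t.2, t.2 + 1)) s)
      (result0, 1)
  final.1

-- ===== PORT B =====
def solve_alt (N : Int) (A : List Int) : List Int :=
  -- order = sorted(range(N), key=lambda i: (A[i], -i)); toLex is Python's lexicographic tuple order
  let order : List Int :=
    PySem.List.sorted (PySem.List.pyRange 0 N) (fun i => toLex (PySem.List.pyGetD A i 0, -i))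
  -- result = [0] * N
  let result0 : List Int := List.replicate N.toNat 0
  -- for p, i in enumerate(order): result[i] = p + 1
  (PySem.List.enumerate order 0).foldl
    (fun r pi => PySem.List.pySetD r pi.2 (pi.1 + 1)) result0

-- ===== PRECONDITION & SPEC =====
-- Pre_ restricts to the problem's natural domain: the list covers range(N) and the first N values lie in 0..N.
-- It excludes inputs where A raises IndexError (N > len(A), or a value outside -(N+1)..N) and inputs with
-- negative values in -(N+1)..-1, on which A returns but the bucket chosen for a negative value is an artefact
-- of Python's negative-index wraparound (see the cited example), while B ranks by the actual value.
def Pre_solve (N : Int) (A : List Int) : Prop :=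
  N ≤ (A.length : Int) ∧ ∀ x ∈ A.take N.toNat, 0 ≤ x ∧ x ≤ N
instance (N : Int) (A : List Int) : Decidable (Pre_solve N A) := by unfold Pre_solve; infer_instance

def pvWitness_solve : Int × List Int := (3, [2, 1, 3])

def Spec_solve (N : Int) (A : List Int) (out : List Int) : Prop := out = solve_alt N A
instance (N : Int) (A : List Int) (out : List Int) : Decidable (Spec_solve N A out) := by unfold Spec_solve; infer_instance

-- ===== CLAIM (what is proved, stated in full; the proofs are below) =====
def Claim_equal_solve : Prop := ∀ (N : Int) (A : List Int), Dom_solve N A → Pre_solve N A → Spec_solve N A (solve N A)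

-- ===== LEMMAS AND PROOFS =====

-- Python indexed update/read, Int indices: reading j after setting i (both in range, nonnegative)
theorem pvGetD_pySetD_int {α : Type} (xs : List α) (i j : Int) (v d : α)
    (hi0 : 0 ≤ i) (hi : i < (xs.length : Int)) (hj0 : 0 ≤ j) :
    PySem.List.pyGetD (PySem.List.pySetD xs i v) j d = if j = i then v else PySem.List.pyGetD xs j d := by
  rw [show i = ((i.toNat : Nat) : Int) from (Int.toNat_of_nonneg hi0).symm,
      show j = ((j.toNat : Nat) : Int) from (Int.toNat_of_nonneg hj0).symm,
      PySem.List.pyGetD_pySetD_natCast xs i.toNat j.toNat v d (by omega)]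
  by_cases h : j.toNat = i.toNat
  · simp [h]
  · have h2 : ¬ ((j.toNat : Int) = (i.toNat : Int)) := by omega
    rw [if_neg h, if_neg h2]

-- the bucket loop: after appending every index of ixs to bucket A[i], bucket v holds its old
-- content followed by the indices of ixs whose value is v, in order
theorem pvBucket_spec (A : List Int) :
    ∀ (ixs : List Int) (L : List (List Int)),
    (∀ i ∈ ixs, 0 ≤ PySem.List.pyGetD A i 0 ∧ PySem.List.pyGetD A i 0 < (L.length : Int)) →
    ∀ v : Int, 0 ≤ v → v < (L.length : Int) →
    PySem.List.pyGetD
      (ixs.foldl (fun L i =>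
        PySem.List.pySetD L (PySem.List.pyGetD A i 0)
          (PySem.List.pyGetD L (PySem.List.pyGetD A i 0) [] ++ [i])) L) v []
      = PySem.List.pyGetD L v [] ++ ixs.filter (fun i => PySem.List.pyGetD A i 0 == v) := by
  intro ixs
  induction ixs with
  | nil => intro L _ v _ _; simp
  | cons i t ih =>
    intro L hvals v hv0 hv
    have hhead := hvals i (by simp)
    have hlen' : ((PySem.List.pySetD L (PySem.List.pyGetD A i 0)
        (PySem.List.pyGetD L (PySem.List.pyGetD A i 0) [] ++ [i])).length : Int) = (L.length : Int) := by
      rw [PySem.List.length_pySetD]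
    simp only [List.foldl_cons]
    rw [ih _ (by intro j hj; rw [hlen']; exact hvals j (by simp [hj])) v hv0 (by rw [hlen']; exact hv)]
    rw [pvGetD_pySetD_int L _ v _ [] hhead.1 hhead.2 hv0]
    by_cases h : v = PySem.List.pyGetD A i 0
    · simp [h]
    · have hb : (PySem.List.pyGetD A i 0 == v) = false := by
        simp [BEq.beq]; omega
      simp [h, hb]

-- scanning the values 0..V-1 and reading each bucket (here: the filtered index list, reversed)
-- visits every index exactly once
theorem pvBuckets_perm (A : List Int) :
    ∀ (V : Nat) (xs : List Int),
    (∀ i ∈ xs, 0 ≤ PySem.List.pyGetD A i 0 ∧ PySem.List.pyGetD A i 0 < (V : Int)) →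
    ((PySem.List.pyRange 0 (V : Int)).flatMap
        (fun v => (xs.filter (fun i => PySem.List.pyGetD A i 0 == v)).reverse)).Perm xs := by
  intro V
  induction V with
  | zero =>
    intro xs h
    have hxs : xs = [] := by
      cases xs with
      | nil => rfl
      | cons a t => exact absurd (h a (by simp)) (by push_cast; omega)
    simp [hxs, PySem.List.pyRange_one_eq_nil (le_refl 0)]
  | succ V ih =>
    intro xs h
    have hcast : (((V + 1 : Nat)) : Int) = (V : Int) + 1 := by push_cast; ring
    rw [hcast, PySem.List.pyRange_one_append 0 (V : Int) ((V : Int) + 1) (by positivity) (by omega),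
        PySem.List.pyRange_one_singleton, List.flatMap_append]
    have hsing : ([(V : Int)].flatMap
        (fun v => (xs.filter (fun i => PySem.List.pyGetD A i 0 == v)).reverse))
        = (xs.filter (fun i => PySem.List.pyGetD A i 0 == (V : Int))).reverse := by
      simp
    rw [hsing]
    -- split xs by "value = V"
    have hcongr : ∀ v ∈ PySem.List.pyRange 0 (V : Int),
        xs.filter (fun i => PySem.List.pyGetD A i 0 == v)
        = (xs.filter (fun i => !(PySem.List.pyGetD A i 0 == (V : Int)))).filter
            (fun i => PySem.List.pyGetD A i 0 == v) := by
      intro v hv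
      have hvlt : v < (V : Int) := (PySem.List.mem_pyRange_one.mp hv).2
      rw [List.filter_filter]
      apply List.filter_congr
      intro x _
      by_cases hx : PySem.List.pyGetD A x 0 = v
      · have h1 : (PySem.List.pyGetD A x 0 == v) = true := by simp [hx]
        have h2 : (PySem.List.pyGetD A x 0 == (V : Int)) = false := by
          rw [beq_eq_false_iff_ne]; omega
        simp [h1, h2]
      · have h1 : (PySem.List.pyGetD A x 0 == v) = false := by
          rw [beq_eq_false_iff_ne]; omega
        simp [h1]
    have hmapeq :
        (PySem.List.pyRange 0 (V : Int)).flatMap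
          (fun v => (xs.filter (fun i => PySem.List.pyGetD A i 0 == v)).reverse)
        = (PySem.List.pyRange 0 (V : Int)).flatMap
          (fun v => ((xs.filter (fun i => !(PySem.List.pyGetD A i 0 == (V : Int)))).filter
              (fun i => PySem.List.pyGetD A i 0 == v)).reverse) := by
      simp only [List.flatMap_def]
      congr 1
      apply List.map_congr_left
      intro v hv
      rw [hcongr v hv]
    rw [hmapeq]
    have hperm1 := ih (xs.filter (fun i => !(PySem.List.pyGetD A i 0 == (V : Int))))
      (by
        intro i hi
        have hmem := List.mem_of_mem_filter hi
        have hne : ¬ (PySem.List.pyGetD A i 0 = (V : Int)) := by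
          simpa using List.of_mem_filter hi
        have hb := h i hmem
        exact ⟨hb.1, by omega⟩)
    refine ((hperm1.append ((xs.filter (fun i => PySem.List.pyGetD A i 0 == (V : Int))).reverse_perm)).trans ?_)
    exact (List.perm_append_comm).trans (List.filter_append_perm _ xs)

-- the bucket scan lists the indices in strictly increasing key (A[i], -i) order
theorem pvBuckets_pairwise (A : List Int) (N : Int) :
    ((PySem.List.pyRange 0 (N + 1)).flatMap
        (fun v => ((PySem.List.pyRange 0 N).filter (fun i => PySem.List.pyGetD A i 0 == v)).reverse)).Pairwise
      (fun a b => (toLex (PySem.List.pyGetD A a 0, -a) : Int ×ₗ Int) < toLex (PySem.List.pyGetD A b 0, -b)) := by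
  rw [List.flatMap_def, List.pairwise_flatten]
  constructor
  · intro l' hl'
    obtain ⟨v, _, rfl⟩ := List.mem_map.mp hl'
    rw [List.pairwise_reverse]
    have hpw := (PySem.List.pairwise_lt_pyRange_one 0 N).filter
      (fun i => PySem.List.pyGetD A i 0 == v)
    refine hpw.imp_of_mem ?_
    intro a b ha hb hab
    have hva : PySem.List.pyGetD A a 0 = v := by simpa using List.of_mem_filter ha
    have hvb : PySem.List.pyGetD A b 0 = v := by simpa using List.of_mem_filter hb
    rw [Prod.Lex.toLex_lt_toLex]
    right
    exact ⟨by rw [hva, hvb], by omega⟩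
  · rw [List.pairwise_map]
    refine (PySem.List.pairwise_lt_pyRange_one 0 (N + 1)).imp_of_mem ?_
    intro v w _ _ hvw x hx y hy
    have hvx : PySem.List.pyGetD A x 0 = v := by
      simpa using List.of_mem_filter (List.mem_reverse.mp hx)
    have hvy : PySem.List.pyGetD A y 0 = w := by
      simpa using List.of_mem_filter (List.mem_reverse.mp hy)
    rw [Prod.Lex.toLex_lt_toLex]
    left
    rw [hvx, hvy]; exact hvw

-- B's enumerate-and-write loop is A's counter loop over the same index order
theorem pvEnumerate_fold (order : List Int) :
    ∀ (res : List Int) (s : Int),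
    (PySem.List.enumerate order s).foldl (fun r pi => PySem.List.pySetD r pi.2 (pi.1 + 1)) res
      = (order.foldl (fun t j => (PySem.List.pySetD t.1 j t.2, t.2 + 1)) (res, s + 1)).1 := by
  induction order with
  | nil => intro res s; simp [PySem.List.enumerate_nil]
  | cons j t ih =>
    intro res s
    rw [PySem.List.enumerate_cons]
    simp only [List.foldl_cons]
    rw [ih (PySem.List.pySetD res j (s + 1)) (s + 1)]

-- [0 for _ in range(N)] is [0] * N
theorem pvResult0_eq (N : Int) :
    (PySem.List.pyRange 0 N).map (fun _ => (0 : Int)) = List.replicate N.toNat 0 := by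
  rw [List.map_const', PySem.List.length_pyRange_one]
  norm_num

theorem solve_eq_core (N : Int) (A : List Int) (h : Pre_solve N A) :
    solve N A = solve_alt N A := by
  obtain ⟨hlen, hvals⟩ := h
  by_cases hN : N < 0
  · -- range(N) and range(N+1) are both empty
    have h1 : PySem.List.pyRange 0 N = [] := PySem.List.pyRange_one_eq_nil (by omega)
    have h2 : PySem.List.pyRange 0 (N + 1) = [] := PySem.List.pyRange_one_eq_nil (by omega)
    have h3 : N.toNat = 0 := by omega
    simp [solve, solve_alt, h1, h2, h3, PySem.List.sorted, PySem.List.enumerate_nil]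
  · rw [not_lt] at hN
    -- value bounds for every index of range(N)
    have hval : ∀ i ∈ PySem.List.pyRange 0 N,
        0 ≤ PySem.List.pyGetD A i 0 ∧ PySem.List.pyGetD A i 0 ≤ N := by
      intro i hi
      obtain ⟨hi0, hiN⟩ := PySem.List.mem_pyRange_one.mp hi
      have hilt : i < (A.length : Int) := by omega
      rw [PySem.List.pyGetD_eq_getElem A 0 hi0 hilt]
      have htk : i.toNat < N.toNat := by omega
      have hmem : A[i.toNat] ∈ A.take N.toNat := by
        have hgt : (A.take N.toNat)[i.toNat]'(by
          rw [List.length_take]; omega) = A[i.toNat] := List.getElem_take ..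
        rw [← hgt]; exact List.getElem_mem _
      exact hvals _ hmem
    -- the bucket table
    set LIS0 : List (List Int) := (PySem.List.pyRange 0 (N + 1)).map (fun _ => ([] : List Int)) with hLIS0
    have hL0len : ((LIS0.length : Nat) : Int) = N + 1 := by
      rw [hLIS0, List.length_map, PySem.List.length_pyRange_one]; omega
    set LIS : List (List Int) :=
      (PySem.List.pyRange 0 N).foldl
        (fun L i =>
          PySem.List.pySetD L (PySem.List.pyGetD A i 0)
            (PySem.List.pyGetD L (PySem.List.pyGetD A i 0) [] ++ [i]))
        LIS0 with hLIS
    have hbucket : ∀ v : Int, 0 ≤ v → v < N + 1 →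
        PySem.List.pyGetD LIS v []
          = (PySem.List.pyRange 0 N).filter (fun i => PySem.List.pyGetD A i 0 == v) := by
      intro v hv0 hv1
      rw [hLIS, pvBucket_spec A _ LIS0
        (by intro i hi; have := hval i hi; rw [hL0len]; omega)
        v hv0 (by rw [hL0len]; omega)]
      have : PySem.List.pyGetD LIS0 v [] = [] := by
        rw [hLIS0]
        exact PySem.List.pyGetD_map_pyRange_of_nonneg _ _ _ _ hv0 hv1
      rw [this, List.nil_append]
    -- name the visiting order
    set ord : List Int := (PySem.List.pyRange 0 (N + 1)).flatMap
        (fun v => ((PySem.List.pyRange 0 N).filter (fun i => PySem.List.pyGetD A i 0 == v)).reverse)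
      with hord
    -- B's sorted order is exactly the bucket-scan order
    have hsorted : PySem.List.sorted (PySem.List.pyRange 0 N)
        (fun i => toLex (PySem.List.pyGetD A i 0, -i)) = ord := by
      apply PySem.List.sorted_eq_of_perm_of_pairwise_lt
      · have hcast : ((N + 1).toNat : Int) = N + 1 := by omega
        have := pvBuckets_perm A (N + 1).toNat (PySem.List.pyRange 0 N)
          (by intro i hi; have := hval i hi; rw [hcast]; omega)
        rw [hcast] at this
        rw [hord]; exact this
      · rw [hord]; exact pvBuckets_pairwise A N
    -- both sides reduce to the same counter fold over ord
    show (((PySem.List.pyRange 0 (N + 1)).foldl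
        (fun s i =>
          ((PySem.List.slice? (PySem.List.pyGetD LIS i []) none none (-1)).getD []).foldl
            (fun t j => (PySem.List.pySetD t.1 j t.2, t.2 + 1)) s)
        ((PySem.List.pyRange 0 N).map (fun _ => (0 : Int)), 1)).1) = _
    have hA2 : ((PySem.List.pyRange 0 (N + 1)).foldl
        (fun s i =>
          ((PySem.List.slice? (PySem.List.pyGetD LIS i []) none none (-1)).getD []).foldl
            (fun t j => (PySem.List.pySetD t.1 j t.2, t.2 + 1)) s)
        ((PySem.List.pyRange 0 N).map (fun _ => (0 : Int)), 1))
        = ord.foldl (fun t j => (PySem.List.pySetD t.1 j t.2, t.2 + 1))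
            ((PySem.List.pyRange 0 N).map (fun _ => (0 : Int)), 1) := by
      rw [hord, List.foldl_flatMap]
      apply PySem.List.foldl_congr_mem
      intro acc v hv
      obtain ⟨hv0, hv1⟩ := PySem.List.mem_pyRange_one.mp hv
      rw [PySem.List.slice?_none_none_neg_one, Option.getD_some, hbucket v hv0 hv1]
    rw [hA2]
    show _ = (PySem.List.enumerate (PySem.List.sorted (PySem.List.pyRange 0 N)
        (fun i => toLex (PySem.List.pyGetD A i 0, -i))) 0).foldl
        (fun r pi => PySem.List.pySetD r pi.2 (pi.1 + 1)) (List.replicate N.toNat 0)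
    rw [hsorted, pvEnumerate_fold ord (List.replicate N.toNat 0) 0, pvResult0_eq]
    norm_num

-- ===== VERDICT (by name: the statement is the Claim_ definition above) =====
theorem solve_spec : Claim_equal_solve := by
  intro N A _ hpre
  unfold Spec_solve
  exact solve_eq_core N A hpre
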